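-- pv_equiv track=rewrite | github.com/TONYLLQ/backend-migraciones | executions/tasks.py | _strip_trailing_order_by
-- ===== SOURCE A (Python) =====
-- def _strip_trailing_order_by(sql: str) -> str:
--     lower = sql.lower()
--     depth = 0
--     last_order_by = -1
--     i = 0
--     while i < len(sql) - 7:
--         ch = sql[i]
--         if ch == "(":
--             depth += 1
--         elif ch == ")" and depth > 0:
--             depth -= 1
--         if depth == 0 and lower.startswith("order by", i):
--             prev_ok = i == 0 or not lower[i - 1].isalnum()
--             if prev_ok:
--                 last_order_by = i
--         i += 1
--     if last_order_by != -1: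
--         return sql[:last_order_by].rstrip()
--     return sql
-- ===== SOURCE B (Python) =====
-- def _strip_trailing_order_by(sql: str) -> str:
--     lower = sql.lower()
--     best = -1
--     depth = 0
--     scanned = 0
--     pos = lower.find("order by")
--     while pos != -1:
--         for ch in sql[scanned:pos]:
--             if ch == "(":
--                 depth += 1
--             elif ch == ")" and depth > 0:
--                 depth -= 1
--         scanned = pos
--         if depth == 0 and (pos == 0 or not lower[pos - 1].isalnum()):
--             best = pos
--         pos = lower.find("order by", pos + 1)
--     if best != -1:
--         return sql[:best].rstrip()
--     return sql
-- ===== Notes on version B (the rewrite author's own statement) =====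
-- stated objective: alternative
-- what changed: Replaces A's uniform per-character while-loop (which tests startswith('order by') at every top-level position) with an occurrence-driven loop: str.find enumerates the 'order by' hits and the floor-at-0 paren depth is advanced only over the gap between consecutive hits, keeping the last hit at depth 0 with a non-alphanumeric predecessor.
import Mathlib
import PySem

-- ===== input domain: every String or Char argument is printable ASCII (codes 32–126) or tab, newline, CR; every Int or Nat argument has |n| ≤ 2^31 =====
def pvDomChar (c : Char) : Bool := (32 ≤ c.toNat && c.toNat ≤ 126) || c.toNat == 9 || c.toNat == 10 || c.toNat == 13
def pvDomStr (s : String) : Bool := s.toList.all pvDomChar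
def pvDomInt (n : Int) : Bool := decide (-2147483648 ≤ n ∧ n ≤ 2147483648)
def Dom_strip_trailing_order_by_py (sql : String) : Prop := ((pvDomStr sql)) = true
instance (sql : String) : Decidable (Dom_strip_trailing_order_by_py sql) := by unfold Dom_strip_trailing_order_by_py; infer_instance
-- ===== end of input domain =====

-- B replaces A's uniform per-character scan (testing "order by" at every index) with an
-- occurrence-driven loop: str.find enumerates the hits and the paren depth is advanced only
-- over the gap between consecutive hits (objective: alternative decomposition, same cost class).

-- ===== PORT A =====
-- Port of A's while-loop as a foldl over List.range (len - 7) (Python's `while i < len(sql)-7`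
-- with i += 1; for len < 7 Python's bound is negative and the loop body never runs, matching
-- Nat subtraction).  `lower.startswith("order by", i)` is ported as startswith on lc.drop i
-- (exact for 0 ≤ i).  The -1 sentinel of last_order_by is ported as Option Nat (none = -1);
-- depth is a Nat: Python's `depth > 0` guard keeps it non-negative throughout.
-- sql[i] / lower[i-1] are in range at every access, so List.getD is exact there.
def strip_trailing_order_by_py (sql : String) : String :=
  let cs := sql.toList
  let lc := PySem.Chars.lower cs
  let st := (List.range (cs.length - 7)).foldl
    (fun (st : Nat × Option Nat) (i : Nat) =>
      let ch := cs.getD i ' '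
      let depth := if ch = '(' then st.1 + 1 else if ch = ')' ∧ 0 < st.1 then st.1 - 1 else st.1
      let last := if depth = 0 ∧ PySem.Chars.startswith (lc.drop i) ("order by".toList) = true ∧
          (i = 0 ∨ PySem.Chars.isalnum (lc.getD (i - 1) ' ') = false)
        then some i else st.2
      (depth, last)) ((0 : Nat), (none : Option Nat))
  match st.2 with
  | some j => String.mk (PySem.Chars.rstrip (PySem.List.slice cs none (some (j : Int))))
  | none => sql

-- ===== PORT B =====
-- termination fact for B's loop, cited in decreasing_by: a successful find lands at or after
-- the start position and leaves room for the pattern.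
theorem pv_findFrom_bounds (lc sub : List Char) (pos : Nat)
    (hf : PySem.Chars.findFrom lc sub (pos : Int) none ≠ -1) :
    pos ≤ (PySem.Chars.findFrom lc sub (pos : Int) none).toNat ∧
    (PySem.Chars.findFrom lc sub (pos : Int) none).toNat + sub.length ≤ lc.length := by
  by_cases hp : pos ≤ lc.length
  · rw [PySem.Chars.findFrom_natCast lc sub pos hp] at hf ⊢
    split at hf
    · exact absurd rfl hf
    · rename_i hr
      have h0 : -1 ≤ PySem.Chars.find (lc.drop pos) sub := PySem.Chars.neg_one_le_find _ _
      have h1 : 0 ≤ PySem.Chars.find (lc.drop pos) sub := by omega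
      have h2 := (PySem.Chars.find_spec (s := lc.drop pos) (sub := sub) h1).1
      have h3 := h2.length_le
      have h4 : (List.drop (PySem.Chars.find (lc.drop pos) sub).toNat (lc.drop pos)).length
          = lc.length - pos - (PySem.Chars.find (lc.drop pos) sub).toNat := by
        simp [Nat.sub_sub]
      have h5 := PySem.Chars.find_le_length (lc.drop pos) sub
      simp only [List.length_drop] at h5
      omega
  · exfalso
    apply hf
    unfold PySem.Chars.findFrom
    have h1 : ¬ ((pos : Int) < 0) := by omega
    have h2 : ((lc.length : Int)) < (pos : Int) := by exact_mod_cast Nat.lt_of_not_le hp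
    simp only [h1, if_false, if_neg h1]
    rw [if_pos]
    omega

-- Port of B's while-loop over find-hits: f = lower.find("order by", pos); on a hit j, the
-- depth is advanced over sql[scanned:j] (PySem.List.slice, exact), best is updated when the
-- hit is at top level with a non-alphanumeric predecessor, and the loop continues from j+1.
-- best = -1 is ported as Option Nat (none = -1).
def stripB_go (cs lc : List Char) (best : Option Nat) (depth scanned pos : Nat) : Option Nat :=
  let f := PySem.Chars.findFrom lc ("order by".toList) (pos : Int) none
  if hf : f = -1 then best
  else
    let j := f.toNat
    let depth' := (PySem.List.slice cs (some (scanned : Int)) (some (j : Int))).foldl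
      (fun d ch => if ch = '(' then d + 1 else if ch = ')' ∧ 0 < d then d - 1 else d) depth
    let best' := if depth' = 0 ∧ (j = 0 ∨ PySem.Chars.isalnum (lc.getD (j - 1) ' ') = false)
      then some j else best
    stripB_go cs lc best' depth' j (j + 1)
  termination_by lc.length + 1 - pos
  decreasing_by
    have h := pv_findFrom_bounds lc ("order by".toList) pos hf
    have h8 : ("order by".toList).length = 8 := by decide
    omega

def strip_trailing_order_by_py_alt (sql : String) : String :=
  let cs := sql.toList
  let lc := PySem.Chars.lower cs
  match stripB_go cs lc none 0 0 0 with
  | some j => String.mk (PySem.Chars.rstrip (PySem.List.slice cs none (some (j : Int))))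
  | none => sql

-- ===== PRECONDITION & SPEC =====
def Spec_strip_trailing_order_by_py (sql : String) (out : String) : Prop := out = strip_trailing_order_by_py_alt sql
instance (sql : String) (out : String) : Decidable (Spec_strip_trailing_order_by_py sql out) := by unfold Spec_strip_trailing_order_by_py; infer_instance

-- ===== CLAIM (what is proved, stated in full; the proofs are below) =====
def Claim_equal_strip_trailing_order_by_py : Prop := ∀ (sql : String), Dom_strip_trailing_order_by_py sql → Spec_strip_trailing_order_by_py sql (strip_trailing_order_by_py sql)

-- ===== LEMMAS AND PROOFS =====

-- floored paren depth of the first k characters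
def pvD (cs : List Char) (k : Nat) : Nat :=
  (cs.take k).foldl (fun d ch => if ch = '(' then d + 1 else if ch = ')' ∧ 0 < d then d - 1 else d) 0

-- the common candidate test: depth 0 before position i, "order by" starts at i in the
-- lowercased text, and the previous character (if any) is not alphanumeric
def pvCond (cs lc : List Char) (i : Nat) : Bool :=
  (pvD cs i == 0) && PySem.Chars.startswith (lc.drop i) ("order by".toList) &&
  ((i == 0) || !(PySem.Chars.isalnum (lc.getD (i - 1) ' ')))

theorem pvCond_iff (cs lc : List Char) (i : Nat) :
    pvCond cs lc i = true ↔
    (pvD cs i = 0 ∧ PySem.Chars.startswith (lc.drop i) ("order by".toList) = true ∧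
      (i = 0 ∨ PySem.Chars.isalnum (lc.getD (i - 1) ' ') = false)) := by
  simp [pvCond, and_assoc]

-- "keep the last i with pvCond" as a fold
def pvBest (cs lc : List Char) (b : Option Nat) (l : List Nat) : Option Nat :=
  l.foldl (fun b i => if pvCond cs lc i then some i else b) b

theorem pvBest_none (cs lc : List Char) (b : Option Nat) (l : List Nat)
    (h : ∀ i ∈ l, pvCond cs lc i = false) : pvBest cs lc b l = b := by
  induction l generalizing b with
  | nil => rfl
  | cons x xs ih =>
    simp only [pvBest, List.foldl_cons, h x List.mem_cons_self]
    exact ih b (fun i hi => h i (List.mem_cons_of_mem _ hi))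

theorem pvBest_append (cs lc : List Char) (b : Option Nat) (l₁ l₂ : List Nat) :
    pvBest cs lc b (l₁ ++ l₂) = pvBest cs lc (pvBest cs lc b l₁) l₂ := by
  simp [pvBest, List.foldl_append]

-- a startswith hit in the lowered text: room for the pattern, and the character there is
-- an 'o'/'O', in particular not a parenthesis
theorem pvSW_facts (cs : List Char) (i : Nat)
    (h : PySem.Chars.startswith ((PySem.Chars.lower cs).drop i) ("order by".toList) = true) :
    i + 8 ≤ cs.length ∧ cs.getD i ' ' ≠ '(' ∧ cs.getD i ' ' ≠ ')' := by
  rw [PySem.Chars.startswith_iff] at h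
  obtain ⟨t, ht⟩ := h
  have hlen := congrArg List.length ht
  simp only [List.length_append, List.length_drop, PySem.Chars.lower, List.length_map] at hlen
  have h8 : ("order by".toList).length = 8 := by decide
  rw [h8] at hlen
  have hi8 : i + 8 ≤ cs.length := by omega
  have hi : i < cs.length := by omega
  have hh := congrArg List.head? ht
  rw [List.head?_drop] at hh
  have hcs : cs[i]? = some (cs.getD i ' ') := by
    rw [List.getD_eq_getElem cs ' ' hi]
    exact List.getElem?_eq_getElem hi
  have hmap : (PySem.Chars.lower cs)[i]? = some (PySem.Chars.lowerChar (cs.getD i ' ')) := by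
    simp only [PySem.Chars.lower, List.getElem?_map, hcs, Option.map_some]
  rw [hmap] at hh
  have hheadL : ("order by".toList ++ t).head? = some 'o' := rfl
  rw [hheadL] at hh
  have hlo : PySem.Chars.lowerChar (cs.getD i ' ') = 'o' := (Option.some.inj hh).symm
  refine ⟨hi8, ?_, ?_⟩ <;> intro hc <;> rw [hc] at hlo <;> revert hlo <;> decide

theorem pvD_succ (cs : List Char) (k : Nat) (hk : k < cs.length) :
    pvD cs (k + 1) =
      (if cs.getD k ' ' = '(' then pvD cs k + 1
       else if cs.getD k ' ' = ')' ∧ 0 < pvD cs k then pvD cs k - 1 else pvD cs k) := by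
  have hk' : cs[k]? = some (cs.getD k ' ') := by
    rw [List.getD_eq_getElem cs ' ' hk]
    exact List.getElem?_eq_getElem hk
  unfold pvD
  rw [List.take_succ, hk', List.foldl_append]
  rfl

theorem pvD_segment (cs : List Char) (scanned j : Nat) (h : scanned ≤ j) :
    (List.take (j - scanned) (List.drop scanned cs)).foldl
      (fun d ch => if ch = '(' then d + 1 else if ch = ')' ∧ 0 < d then d - 1 else d)
      (pvD cs scanned) = pvD cs j := by
  have hsplit : cs.take j = cs.take scanned ++ List.take (j - scanned) (List.drop scanned cs) := by
    conv_lhs => rw [show j = scanned + (j - scanned) by omega]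
    exact List.take_add
  unfold pvD
  rw [hsplit, List.foldl_append]

theorem pvA_loop (cs : List Char) (k : Nat) (hk : k ≤ cs.length) :
    (List.range k).foldl
      (fun (st : Nat × Option Nat) (i : Nat) =>
        let ch := cs.getD i ' '
        let depth := if ch = '(' then st.1 + 1 else if ch = ')' ∧ 0 < st.1 then st.1 - 1 else st.1
        let last := if depth = 0 ∧
            PySem.Chars.startswith ((PySem.Chars.lower cs).drop i) ("order by".toList) = true ∧
            (i = 0 ∨ PySem.Chars.isalnum ((PySem.Chars.lower cs).getD (i - 1) ' ') = false)
          then some i else st.2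
        (depth, last)) ((0 : Nat), (none : Option Nat))
    = (pvD cs k, pvBest cs (PySem.Chars.lower cs) none (List.range k)) := by
  induction k with
  | zero => rfl
  | succ k ih =>
    have hk1 : k ≤ cs.length := by omega
    have hklt : k < cs.length := by omega
    rw [List.range_succ, List.foldl_append, ih hk1]
    simp only [List.foldl_cons, List.foldl_nil]
    rw [Prod.mk.injEq]
    constructor
    · exact (pvD_succ cs k hklt).symm
    · unfold pvBest
      simp only [List.foldl_append, List.foldl_cons, List.foldl_nil]
      by_cases hsw : PySem.Chars.startswith ((PySem.Chars.lower cs).drop k) ("order by".toList) = true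
      · have hfacts := pvSW_facts cs k hsw
        have hDeq : (if cs.getD k ' ' = '(' then pvD cs k + 1
            else if cs.getD k ' ' = ')' ∧ 0 < pvD cs k then pvD cs k - 1 else pvD cs k) = pvD cs k := by
          rw [if_neg hfacts.2.1, if_neg (fun hc => hfacts.2.2 hc.1)]
        rw [hDeq]
        by_cases hb : pvD cs k = 0 ∧
            PySem.Chars.startswith ((PySem.Chars.lower cs).drop k) ("order by".toList) = true ∧
            (k = 0 ∨ PySem.Chars.isalnum ((PySem.Chars.lower cs).getD (k - 1) ' ') = false)
        · rw [if_pos hb, if_pos ((pvCond_iff cs (PySem.Chars.lower cs) k).mpr hb)]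
        · rw [if_neg hb, if_neg (by
            intro hcc
            exact hb ((pvCond_iff cs (PySem.Chars.lower cs) k).mp hcc))]
      · rw [if_neg (by intro hcc; exact hsw hcc.2.1), if_neg (by
          intro hcc
          exact hsw ((pvCond_iff cs (PySem.Chars.lower cs) k).mp hcc).2.1)]

theorem pvOB_ne_nil : ("order by".toList) ≠ [] := by decide

theorem pvB_loop (cs : List Char) (N : Nat) :
    ∀ (pos scanned : Nat) (b : Option Nat), scanned ≤ pos → pos ≤ cs.length →
      cs.length - pos ≤ N →
      stripB_go cs (PySem.Chars.lower cs) b (pvD cs scanned) scanned pos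
        = pvBest cs (PySem.Chars.lower cs) b (List.range' pos (cs.length - pos)) := by
  have hlc : (PySem.Chars.lower cs).length = cs.length := by
    simp [PySem.Chars.lower]
  induction N with
  | zero =>
    intro pos scanned b hsp hp hN
    have hpe : pos = cs.length := by omega
    have hf : PySem.Chars.findFrom (PySem.Chars.lower cs) ("order by".toList) (pos : Int) none = -1 := by
      rw [PySem.Chars.findFrom_natCast_eq_neg_one_iff _ _ pos (by omega)]
      intro hinf
      have hd : (PySem.Chars.lower cs).drop pos = [] := by
        apply List.drop_eq_nil_of_le
        omega
      rw [hd] at hinf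
      exact pvOB_ne_nil (List.eq_nil_of_infix_nil hinf)
    rw [stripB_go]
    simp only [dif_pos hf]
    rw [show cs.length - pos = 0 by omega, List.range'_zero]
    rfl
  | succ N ih =>
    intro pos scanned b hsp hp hN
    by_cases hf : PySem.Chars.findFrom (PySem.Chars.lower cs) ("order by".toList) (pos : Int) none = -1
    · rw [stripB_go]
      simp only [dif_pos hf]
      have hni := (PySem.Chars.findFrom_natCast_eq_neg_one_iff _ ("order by".toList) pos (by omega)).mp hf
      symm
      apply pvBest_none
      intro i hi
      rw [List.mem_range'] at hi
      obtain ⟨hi1, _⟩ := hi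
      rw [Bool.eq_false_iff]
      intro hcc
      have hsw := ((pvCond_iff cs (PySem.Chars.lower cs) i).mp hcc).2.1
      rw [PySem.Chars.startswith_iff] at hsw
      apply hni
      have hdd : (PySem.Chars.lower cs).drop i
          = List.drop (i - pos) ((PySem.Chars.lower cs).drop pos) := by
        rw [List.drop_drop]
        congr 1
        omega
      rw [hdd] at hsw
      exact hsw.isInfix.trans (List.drop_suffix _ _).isInfix
    · have hb := pv_findFrom_bounds (PySem.Chars.lower cs) ("order by".toList) pos hf
      have h8 : ("order by".toList).length = 8 := by decide
      rw [h8] at hb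
      have hspec := PySem.Chars.findFrom_natCast_spec (PySem.Chars.lower cs) ("order by".toList) pos (by omega) hf
      obtain ⟨hpos_le, hpre, hmin⟩ := hspec
      rw [stripB_go]
      simp only [dif_neg hf]
      set f := PySem.Chars.findFrom (PySem.Chars.lower cs) ("order by".toList) (pos : Int) none with hfdef
      rw [PySem.List.slice_natCast cs scanned f.toNat, pvD_segment cs scanned f.toNat (by omega)]
      rw [ih (f.toNat + 1) f.toNat _ (Nat.le_succ _) (by omega) (by omega)]
      have hsplit : List.range' pos (cs.length - pos)
          = List.range' pos (f.toNat - pos) ++ f.toNat :: List.range' (f.toNat + 1) (cs.length - (f.toNat + 1)) := by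
        have h1 : List.range' f.toNat (cs.length - f.toNat)
            = f.toNat :: List.range' (f.toNat + 1) (cs.length - (f.toNat + 1)) := by
          rw [show cs.length - f.toNat = (cs.length - (f.toNat + 1)) + 1 by omega]
          rw [List.range'_succ]
        calc List.range' pos (cs.length - pos)
            = List.range' pos ((f.toNat - pos) + (cs.length - f.toNat)) := by
              congr 1
              omega
          _ = List.range' pos (f.toNat - pos) ++ List.range' (pos + 1 * (f.toNat - pos)) (cs.length - f.toNat) := by
              rw [List.range'_append]
          _ = List.range' pos (f.toNat - pos) ++ f.toNat :: List.range' (f.toNat + 1) (cs.length - (f.toNat + 1)) := by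
              rw [show pos + 1 * (f.toNat - pos) = f.toNat by omega, h1]
      rw [hsplit, pvBest_append]
      have hpart1 : pvBest cs (PySem.Chars.lower cs) b (List.range' pos (f.toNat - pos)) = b := by
        apply pvBest_none
        intro i hi
        rw [List.mem_range'] at hi
        rw [Bool.eq_false_iff]
        intro hcc
        have hsw := ((pvCond_iff cs (PySem.Chars.lower cs) i).mp hcc).2.1
        rw [PySem.Chars.startswith_iff] at hsw
        exact hmin i (by omega) (by omega) hsw
      rw [hpart1]
      unfold pvBest
      simp only [List.foldl_cons]
      have hswj : PySem.Chars.startswith ((PySem.Chars.lower cs).drop f.toNat) ("order by".toList) = true :=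
        (PySem.Chars.startswith_iff _ _).mpr hpre
      by_cases hcnd : pvD cs f.toNat = 0 ∧
          (f.toNat = 0 ∨ PySem.Chars.isalnum ((PySem.Chars.lower cs).getD (f.toNat - 1) ' ') = false)
      · rw [if_pos hcnd, if_pos ((pvCond_iff cs (PySem.Chars.lower cs) f.toNat).mpr
          ⟨hcnd.1, hswj, hcnd.2⟩)]
      · rw [if_neg hcnd, if_neg (by
          intro hcc
          have := (pvCond_iff cs (PySem.Chars.lower cs) f.toNat).mp hcc
          exact hcnd ⟨this.1, this.2.2⟩)]

theorem pvBest_trunc (cs : List Char) :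
    pvBest cs (PySem.Chars.lower cs) none (List.range cs.length)
      = pvBest cs (PySem.Chars.lower cs) none (List.range (cs.length - 7)) := by
  obtain ⟨m, hm⟩ : ∃ m, cs.length = (cs.length - 7) + m := ⟨cs.length - (cs.length - 7), by omega⟩
  conv_lhs => rw [List.range_eq_range', hm, ← List.range'_append]
  rw [pvBest_append, one_mul, Nat.zero_add, ← List.range_eq_range']
  apply pvBest_none
  intro i hi
  rw [List.mem_range'] at hi
  rw [Bool.eq_false_iff]
  intro hcc
  have hsw := ((pvCond_iff cs (PySem.Chars.lower cs) i).mp hcc).2.1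
  have := (pvSW_facts cs i hsw).1
  omega

-- ===== VERDICT (by name: the statement is the Claim_ definition above) =====
theorem strip_trailing_order_by_py_spec : Claim_equal_strip_trailing_order_by_py := by
  intro sql _hd
  unfold Spec_strip_trailing_order_by_py strip_trailing_order_by_py strip_trailing_order_by_py_alt
  simp only []
  have hA := pvA_loop sql.toList (sql.toList.length - 7) (Nat.sub_le _ _)
  rw [hA]
  have hB := pvB_loop sql.toList sql.toList.length 0 0 none (Nat.le_refl 0) (Nat.zero_le _)
    (by omega)
  rw [show pvD sql.toList 0 = 0 from rfl] at hB
  simp only [Nat.sub_zero] at hB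
  rw [← List.range_eq_range', pvBest_trunc] at hB
  rw [hB]
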